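-- pv_equiv track=rewrite | github.com/LilahLindemann/MIT-Maker-Portfolio | cryptography.py | adv_caesar
-- ===== SOURCE A (Python) =====
-- def adv_caesar(alph,origin,oshift,schange):
--     output = ''
--     shift = oshift
--     for i in range(0,len(origin)):
--         if origin[i] == ' ':
--             output += ' '
--         else:
--             num = alph.index(origin[i])
--             nnum = (num + shift) % 26
--             output += alph[nnum]
--             shift = (shift + schange) % 26
--     return output
-- ===== SOURCE B (Python) =====
-- def adv_caesar(alph, origin, oshift, schange):
--     # the shift of the k-th non-space character is (oshift + k*schange) % 26,
--     # so encode all letters independently, then reassemble around the spaces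
--     letters = [c for c in origin if c != ' ']
--     enc = [alph[(alph.index(c) + oshift + k * schange) % 26]
--            for k, c in enumerate(letters)]
--     it = iter(enc)
--     return ''.join(' ' if c == ' ' else next(it) for c in origin)
-- ===== Notes on version B (the rewrite author's own statement) =====
-- stated objective: alternative
-- what changed: Replaces the single stateful loop threading an evolving shift with two passes: each non-space character is encoded independently via the closed-form shift (oshift + k*schange) % 26 over enumerate, then the result is reassembled by interleaving the encoded letters with the original spaces.
import Mathlib
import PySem

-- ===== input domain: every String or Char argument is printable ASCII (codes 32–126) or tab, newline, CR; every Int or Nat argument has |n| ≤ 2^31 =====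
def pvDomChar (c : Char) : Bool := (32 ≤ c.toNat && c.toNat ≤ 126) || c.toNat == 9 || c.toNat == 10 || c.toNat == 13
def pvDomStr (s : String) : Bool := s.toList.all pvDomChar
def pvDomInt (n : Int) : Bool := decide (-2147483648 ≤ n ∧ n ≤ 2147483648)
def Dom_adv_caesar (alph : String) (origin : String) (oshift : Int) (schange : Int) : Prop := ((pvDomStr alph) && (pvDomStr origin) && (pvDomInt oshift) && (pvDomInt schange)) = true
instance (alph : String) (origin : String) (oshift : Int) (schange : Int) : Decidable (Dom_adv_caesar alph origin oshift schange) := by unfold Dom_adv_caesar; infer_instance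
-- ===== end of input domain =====

-- B re-implements the advancing-shift Caesar cipher with the closed-form shift
-- (oshift + k*schange) % 26 per non-space character, in two passes (encode letters,
-- then reassemble around the spaces), instead of A's single loop threading a shift.

-- ===== PORT A =====
-- A's loop: walk origin, thread (output, shift); 'none' marks a Python exception
-- (ValueError from alph.index, IndexError from alph[nnum]), excluded by Pre_.
def advLoopA (alph : List Char) (schange : Int) : List Char → Int → List Char → Option (List Char)
  | [], _, out => some out
  | c :: rest, shift, out =>
    if c = ' ' then advLoopA alph schange rest shift (out ++ [' '])
    else
      match PySem.List.index? alph c with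
      | none => none
      | some num =>
        let nnum := PySem.Int.mod ((num : Int) + shift) 26
        match PySem.List.pyGet? alph nnum with
        | none => none
        | some e => advLoopA alph schange rest (PySem.Int.mod (shift + schange) 26) (out ++ [e])

def adv_caesar (alph : String) (origin : String) (oshift : Int) (schange : Int) : String :=
  match advLoopA alph.toList schange origin.toList oshift [] with
  | none => ""
  | some out => String.mk out

-- ===== PORT B =====
-- enc_k = alph[(alph.index(c) + oshift + k*schange) % 26]
def encB (alph : List Char) (oshift : Int) (schange : Int) (kc : Int × Char) : Option Char :=
  match PySem.List.index? alph kc.2 with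
  | none => none
  | some num => PySem.List.pyGet? alph (PySem.Int.mod ((num : Int) + oshift + kc.1 * schange) 26)

-- the enc list comprehension (stops at the first failing letter, like Python raising)
def encAll (alph : List Char) (oshift : Int) (schange : Int) : List (Int × Char) → Option (List Char)
  | [] => some []
  | kc :: rest =>
    match encB alph oshift schange kc with
    | none => none
    | some e => (encAll alph oshift schange rest).map (e :: ·)

-- ''.join(' ' if c == ' ' else next(it) for c in origin)
def rebuildB : List Char → List Char → List Char
  | [], _ => []
  | c :: rest, enc =>
    if c = ' ' then ' ' :: rebuildB rest enc
    else
      match enc with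
      | [] => []  -- unreachable: enc has one letter per non-space char
      | e :: es => e :: rebuildB rest es

def adv_caesar_alt (alph : String) (origin : String) (oshift : Int) (schange : Int) : String :=
  let letters := origin.toList.filter (· ≠ ' ')
  match encAll alph.toList oshift schange (PySem.List.enumerate letters) with
  | none => ""
  | some enc => String.mk (rebuildB origin.toList enc)

-- ===== PRECONDITION & SPEC =====
-- Pre_ excludes exactly the inputs on which Python A raises: a non-space character of
-- origin missing from alph (ValueError), or a shifted index reaching past the end of a
-- short alphabet (IndexError).
def Pre_adv_caesar (alph : String) (origin : String) (oshift : Int) (schange : Int) : Prop :=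
  let letters := origin.toList.filter (· ≠ ' ')
  ∀ k (hk : k < letters.length),
    letters[k] ∈ alph.toList ∧
    (((alph.toList.idxOf letters[k] : Int) + oshift + (k : Int) * schange) % 26).toNat < alph.toList.length
instance (alph : String) (origin : String) (oshift : Int) (schange : Int) : Decidable (Pre_adv_caesar alph origin oshift schange) := by unfold Pre_adv_caesar; infer_instance

def pvWitness_adv_caesar : String × String × Int × Int := ("abcdefghijklmnopqrstuvwxyz", "ab cz", 3, 5)

def Spec_adv_caesar (alph : String) (origin : String) (oshift : Int) (schange : Int) (out : String) : Prop := out = adv_caesar_alt alph origin oshift schange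
instance (alph : String) (origin : String) (oshift : Int) (schange : Int) (out : String) : Decidable (Spec_adv_caesar alph origin oshift schange out) := by unfold Spec_adv_caesar; infer_instance

-- ===== CLAIM (what is proved, stated in full; the proofs are below) =====
def Claim_equal_adv_caesar : Prop := ∀ (alph : String) (origin : String) (oshift : Int) (schange : Int), Dom_adv_caesar alph origin oshift schange → Pre_adv_caesar alph origin oshift schange → Spec_adv_caesar alph origin oshift schange (adv_caesar alph origin oshift schange)

-- ===== LEMMAS AND PROOFS =====

-- Loop invariant: if shift ≡ oshift + k*schange (mod 26), A's loop from (shift, out)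
-- computes B's per-letter encodings from rank k and interleaves them; failures coincide.
theorem advLoopA_eq (alph : List Char) (oshift schange : Int) :
    ∀ (cs : List Char) (k shift : Int) (out : List Char),
      shift % 26 = (oshift + k * schange) % 26 →
      advLoopA alph schange cs shift out =
        (encAll alph oshift schange (PySem.List.enumerate (cs.filter (· ≠ ' ')) k)).map
          (fun enc => out ++ rebuildB cs enc) := by
  intro cs
  induction cs with
  | nil => intro k shift out h; simp [advLoopA, encAll, rebuildB]
  | cons c rest ih =>
    intro k shift out h
    by_cases hc : c = ' '
    · subst hc
      simp only [advLoopA, if_pos rfl, List.filter_cons, decide_eq_true_eq]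
      rw [ih k shift (out ++ [' ']) h]
      simp only [ne_eq, not_true_eq_false, decide_false, if_false]
      cases encAll alph oshift schange (PySem.List.enumerate (rest.filter (· ≠ ' ')) k) with
      | none => rfl
      | some enc => simp [rebuildB]
    · have hf : List.filter (· ≠ ' ') (c :: rest) = c :: rest.filter (· ≠ ' ') := by
        simp [hc]
      rw [hf, PySem.List.enumerate_cons]
      simp only [advLoopA, if_neg hc, encAll, encB]
      cases hidx : PySem.List.index? alph c with
      | none => simp
      | some num =>
        dsimp only
        have hmod : PySem.Int.mod ((num : Int) + shift) 26 =
            PySem.Int.mod ((num : Int) + oshift + k * schange) 26 := by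
          rw [PySem.Int.mod_eq_emod_of_pos (by norm_num : (0:Int) < 26),
              PySem.Int.mod_eq_emod_of_pos (by norm_num : (0:Int) < 26)]
          rw [Int.add_emod (num : Int) shift, h, ← Int.add_emod]
          ring_nf
        rw [hmod]
        cases hget : PySem.List.pyGet? alph (PySem.Int.mod ((num : Int) + oshift + k * schange) 26) with
        | none => simp
        | some e =>
          dsimp only
          have h' : (PySem.Int.mod (shift + schange) 26) % 26 = (oshift + (k + 1) * schange) % 26 := by
            rw [PySem.Int.mod_eq_emod_of_pos (by norm_num : (0:Int) < 26)]
            rw [Int.emod_emod_of_dvd _ (by norm_num : (26:Int) ∣ 26)]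
            rw [Int.add_emod shift schange, h, ← Int.add_emod]
            ring_nf
          rw [ih (k + 1) _ (out ++ [e]) h']
          cases encAll alph oshift schange (PySem.List.enumerate (rest.filter (· ≠ ' ')) (k + 1)) with
          | none => simp
          | some enc => simp [rebuildB, hc]

-- ===== VERDICT (by name: the statement is the Claim_ definition above) =====
theorem adv_caesar_spec : Claim_equal_adv_caesar := by
  intro alph origin oshift schange _ _
  unfold Spec_adv_caesar adv_caesar adv_caesar_alt
  rw [advLoopA_eq alph.toList oshift schange origin.toList 0 oshift [] (by ring_nf)]
  simp only [ne_eq, decide_not]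
  cases h : encAll alph.toList oshift schange (PySem.List.enumerate (origin.toList.filter (fun x => !decide (x = ' '))) 0) <;>
    simp [h]
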